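-- pv_equiv track=rewrite | github.com/gundlacc/CS362-Testing-Project | datetime_helper.py | final_months_days
-- ===== SOURCE A (Python) =====
-- def final_months_days(extra_days, days_passed, total_days, months_passed, final_year):
--     reg_year = [31, 28, 31, 30, 31, 30, 31, 31, 30, 31, 30, 31]
--     leap_year = [31, 29, 31, 30, 31, 30, 31, 31, 30, 31, 30, 31]
--     days = 0
--     months = 0
--     if final_year % 4 == 0:
--         for d in leap_year:
--             days += d
--             if extra_days < days:
--                 months_passed = months
--                 days_passed = extra_days - (days - d)
--                 break
--             months += 1
--
--     if final_year % 4 != 0: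
--         for d in reg_year:
--             days += d
--             if extra_days < days:
--                 months_passed = months
--                 days_passed = extra_days - (days - d)
--                 break
--             months += 1
--
--     return days_passed, months_passed
-- ===== SOURCE B (Python) =====
-- def final_months_days(extra_days, days_passed, total_days, months_passed, final_year):
--     if final_year % 4 == 0:
--         cum = [31, 60, 91, 121, 152, 182, 213, 244, 274, 305, 335, 366]
--     else:
--         cum = [31, 59, 90, 120, 151, 181, 212, 243, 273, 304, 334, 365]
--     # binary search for the first index with extra_days < cum[idx] (bisect_right)
--     lo, hi = 0, 12
--     while lo < hi:
--         mid = (lo + hi) // 2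
--         if extra_days < cum[mid]:
--             hi = mid
--         else:
--             lo = mid + 1
--     if lo == 12:
--         return days_passed, months_passed
--     return extra_days - (cum[lo - 1] if lo > 0 else 0), lo
-- ===== Notes on version B (the rewrite author's own statement) =====
-- stated objective: alternative
-- what changed: Replaced the linear accumulate-and-break scan over month lengths by a hardcoded cumulative-boundary table and a hand-written binary search (bisect_right) for the month index, with the same no-match fallback.
import Mathlib
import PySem

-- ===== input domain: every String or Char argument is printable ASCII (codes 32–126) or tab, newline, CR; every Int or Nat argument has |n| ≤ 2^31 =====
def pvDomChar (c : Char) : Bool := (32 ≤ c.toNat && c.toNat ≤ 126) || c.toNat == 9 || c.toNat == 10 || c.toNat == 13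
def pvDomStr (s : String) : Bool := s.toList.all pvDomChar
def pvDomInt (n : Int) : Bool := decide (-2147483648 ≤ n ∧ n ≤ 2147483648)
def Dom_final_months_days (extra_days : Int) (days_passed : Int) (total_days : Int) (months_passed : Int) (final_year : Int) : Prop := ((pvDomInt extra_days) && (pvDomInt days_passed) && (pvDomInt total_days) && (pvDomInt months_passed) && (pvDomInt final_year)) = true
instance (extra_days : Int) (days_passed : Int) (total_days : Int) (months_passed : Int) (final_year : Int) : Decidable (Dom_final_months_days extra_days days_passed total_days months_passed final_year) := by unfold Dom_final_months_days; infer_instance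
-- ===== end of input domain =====

-- B replaces A's linear accumulate-and-break month scan by a hardcoded cumulative-boundary table
-- plus a hand-written binary search (bisect_right); an alternative decomposition, same return value.

-- ===== PORT A =====
-- the for-loop with break: some (months, new days_passed) if it broke, none if it ran through
def fmdLoopA (extra_days : Int) : List Int → Int → Int → Option (Int × Int)
  | [], _, _ => none
  | d :: rest, days, months =>
    let days' := days + d
    if extra_days < days' then some (months, extra_days - (days' - d))
    else fmdLoopA extra_days rest days' (months + 1)

def final_months_days (extra_days : Int) (days_passed : Int) (total_days : Int) (months_passed : Int) (final_year : Int) : Int × Int :=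
  let reg_year : List Int := [31, 28, 31, 30, 31, 30, 31, 31, 30, 31, 30, 31]
  let leap_year : List Int := [31, 29, 31, 30, 31, 30, 31, 31, 30, 31, 30, 31]
  let r1 := if PySem.Int.mod final_year 4 = 0 then fmdLoopA extra_days leap_year 0 0 else none
  let r2 := if PySem.Int.mod final_year 4 ≠ 0 then fmdLoopA extra_days reg_year 0 0 else none
  match r1, r2 with
  | some (m, dp), _ => (dp, m)
  | none, some (m, dp) => (dp, m)
  | none, none => (days_passed, months_passed)

-- ===== PORT B =====
-- the hand-written bisect_right while-loop of Source B
def fmdBsearch (extra_days : Int) (cum : List Int) (lo hi : Nat) : Nat :=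
  if h : lo < hi then
    let mid := (lo + hi) / 2
    if extra_days < cum.getD mid 0 then fmdBsearch extra_days cum lo mid
    else fmdBsearch extra_days cum (mid + 1) hi
  else lo
termination_by hi - lo
decreasing_by all_goals omega

def final_months_days_alt (extra_days : Int) (days_passed : Int) (total_days : Int) (months_passed : Int) (final_year : Int) : Int × Int :=
  let cum : List Int :=
    if PySem.Int.mod final_year 4 = 0 then
      [31, 60, 91, 121, 152, 182, 213, 244, 274, 305, 335, 366]
    else
      [31, 59, 90, 120, 151, 181, 212, 243, 273, 304, 334, 365]
  let lo := fmdBsearch extra_days cum 0 12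
  if lo = 12 then (days_passed, months_passed)
  else (extra_days - (if lo > 0 then cum.getD (lo - 1) 0 else 0), (lo : Int))

-- ===== PRECONDITION & SPEC =====
def Spec_final_months_days (extra_days : Int) (days_passed : Int) (total_days : Int) (months_passed : Int) (final_year : Int) (out : Int × Int) : Prop := out = final_months_days_alt extra_days days_passed total_days months_passed final_year
instance (extra_days : Int) (days_passed : Int) (total_days : Int) (months_passed : Int) (final_year : Int) (out : Int × Int) : Decidable (Spec_final_months_days extra_days days_passed total_days months_passed final_year out) := by unfold Spec_final_months_days; infer_instance

-- ===== CLAIM (what is proved, stated in full; the proofs are below) =====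
def Claim_equal_final_months_days : Prop := ∀ (extra_days : Int) (days_passed : Int) (total_days : Int) (months_passed : Int) (final_year : Int), Dom_final_months_days extra_days days_passed total_days months_passed final_year → Spec_final_months_days extra_days days_passed total_days months_passed final_year (final_months_days extra_days days_passed total_days months_passed final_year)

-- ===== LEMMAS AND PROOFS =====

theorem bsLeaf (e : Int) (cum : List Int) (lo : Nat) : fmdBsearch e cum lo lo = lo := by
  rw [fmdBsearch]; simp

theorem bs_0_1 (e : Int) (cum : List Int) : fmdBsearch e cum 0 1 = (if e < cum.getD 0 0 then 0 else 1) := by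
  rw [fmdBsearch]; norm_num [bsLeaf]

theorem bs_2_3 (e : Int) (cum : List Int) : fmdBsearch e cum 2 3 = (if e < cum.getD 2 0 then 2 else 3) := by
  rw [fmdBsearch]; norm_num [bsLeaf]

theorem bs_4_5 (e : Int) (cum : List Int) : fmdBsearch e cum 4 5 = (if e < cum.getD 4 0 then 4 else 5) := by
  rw [fmdBsearch]; norm_num [bsLeaf]

theorem bs_7_8 (e : Int) (cum : List Int) : fmdBsearch e cum 7 8 = (if e < cum.getD 7 0 then 7 else 8) := by
  rw [fmdBsearch]; norm_num [bsLeaf]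

theorem bs_10_11 (e : Int) (cum : List Int) : fmdBsearch e cum 10 11 = (if e < cum.getD 10 0 then 10 else 11) := by
  rw [fmdBsearch]; norm_num [bsLeaf]

theorem bs_4_6 (e : Int) (cum : List Int) : fmdBsearch e cum 4 6 = (if e < cum.getD 5 0 then (if e < cum.getD 4 0 then 4 else 5) else 6) := by
  rw [fmdBsearch]; norm_num [bsLeaf, bs_4_5]

theorem bs_7_9 (e : Int) (cum : List Int) : fmdBsearch e cum 7 9 = (if e < cum.getD 8 0 then (if e < cum.getD 7 0 then 7 else 8) else 9) := by
  rw [fmdBsearch]; norm_num [bsLeaf, bs_7_8]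

theorem bs_10_12 (e : Int) (cum : List Int) : fmdBsearch e cum 10 12 = (if e < cum.getD 11 0 then (if e < cum.getD 10 0 then 10 else 11) else 12) := by
  rw [fmdBsearch]; norm_num [bsLeaf, bs_10_11]

theorem bs_0_3 (e : Int) (cum : List Int) : fmdBsearch e cum 0 3 = (if e < cum.getD 1 0 then (if e < cum.getD 0 0 then 0 else 1) else (if e < cum.getD 2 0 then 2 else 3)) := by
  rw [fmdBsearch]; norm_num [bsLeaf, bs_0_1, bs_2_3]

theorem bs_7_12 (e : Int) (cum : List Int) : fmdBsearch e cum 7 12 = (if e < cum.getD 9 0 then (if e < cum.getD 8 0 then (if e < cum.getD 7 0 then 7 else 8) else 9) else (if e < cum.getD 11 0 then (if e < cum.getD 10 0 then 10 else 11) else 12)) := by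
  rw [fmdBsearch]; norm_num [bsLeaf, bs_10_12, bs_7_9]

theorem bs_0_6 (e : Int) (cum : List Int) : fmdBsearch e cum 0 6 = (if e < cum.getD 3 0 then (if e < cum.getD 1 0 then (if e < cum.getD 0 0 then 0 else 1) else (if e < cum.getD 2 0 then 2 else 3)) else (if e < cum.getD 5 0 then (if e < cum.getD 4 0 then 4 else 5) else 6)) := by
  rw [fmdBsearch]; norm_num [bsLeaf, bs_0_3, bs_4_6]

theorem bs_0_12 (e : Int) (cum : List Int) : fmdBsearch e cum 0 12 = (if e < cum.getD 6 0 then (if e < cum.getD 3 0 then (if e < cum.getD 1 0 then (if e < cum.getD 0 0 then 0 else 1) else (if e < cum.getD 2 0 then 2 else 3)) else (if e < cum.getD 5 0 then (if e < cum.getD 4 0 then 4 else 5) else 6)) else (if e < cum.getD 9 0 then (if e < cum.getD 8 0 then (if e < cum.getD 7 0 then 7 else 8) else 9) else (if e < cum.getD 11 0 then (if e < cum.getD 10 0 then 10 else 11) else 12))) := by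
  rw [fmdBsearch]; norm_num [bsLeaf, bs_0_6, bs_7_12]


-- A's scan over either month list, fully characterised as an if-chain
theorem loopA_leap (e : Int) : fmdLoopA e [31, 29, 31, 30, 31, 30, 31, 31, 30, 31, 30, 31] 0 0 =
    (if e < 31 then some (0, e) else if e < 60 then some (1, e-31) else if e < 91 then some (2, e-60)
     else if e < 121 then some (3, e-91) else if e < 152 then some (4, e-121) else if e < 182 then some (5, e-152)
     else if e < 213 then some (6, e-182) else if e < 244 then some (7, e-213) else if e < 274 then some (8, e-244)
     else if e < 305 then some (9, e-274) else if e < 335 then some (10, e-305) else if e < 366 then some (11, e-335)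
     else none) := by
  simp only [fmdLoopA]
  norm_num

theorem loopA_reg (e : Int) : fmdLoopA e [31, 28, 31, 30, 31, 30, 31, 31, 30, 31, 30, 31] 0 0 =
    (if e < 31 then some (0, e) else if e < 59 then some (1, e-31) else if e < 90 then some (2, e-59)
     else if e < 120 then some (3, e-90) else if e < 151 then some (4, e-120) else if e < 181 then some (5, e-151)
     else if e < 212 then some (6, e-181) else if e < 243 then some (7, e-212) else if e < 273 then some (8, e-243)
     else if e < 304 then some (9, e-273) else if e < 334 then some (10, e-304) else if e < 365 then some (11, e-334)
     else none) := by
  simp only [fmdLoopA]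
  norm_num

theorem fmd_eq_leap (e dp mp : Int) :
    (match fmdLoopA e [31, 29, 31, 30, 31, 30, 31, 31, 30, 31, 30, 31] 0 0 with
      | some (m, d) => (d, m) | none => (dp, mp)) =
    (if fmdBsearch e [31, 60, 91, 121, 152, 182, 213, 244, 274, 305, 335, 366] 0 12 = 12 then (dp, mp)
     else (e - (if fmdBsearch e [31, 60, 91, 121, 152, 182, 213, 244, 274, 305, 335, 366] 0 12 > 0 then ([31, 60, 91, 121, 152, 182, 213, 244, 274, 305, 335, 366] : List Int).getD (fmdBsearch e [31, 60, 91, 121, 152, 182, 213, 244, 274, 305, 335, 366] 0 12 - 1) 0 else 0),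
           (fmdBsearch e [31, 60, 91, 121, 152, 182, 213, 244, 274, 305, 335, 366] 0 12 : Int))) := by
  rw [loopA_leap, bs_0_12]
  by_cases h0 : e < 31
  · norm_num [h0, show e < 60 by omega, show e < 91 by omega, show e < 121 by omega, show e < 152 by omega, show e < 182 by omega, show e < 213 by omega, show e < 244 by omega, show e < 274 by omega, show e < 305 by omega, show e < 335 by omega, show e < 366 by omega]
  push_neg at h0
  by_cases h1 : e < 60
  · norm_num [h1, show ¬ e < 31 by omega, show e < 91 by omega, show e < 121 by omega, show e < 152 by omega, show e < 182 by omega, show e < 213 by omega, show e < 244 by omega, show e < 274 by omega, show e < 305 by omega, show e < 335 by omega, show e < 366 by omega]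
  push_neg at h1
  by_cases h2 : e < 91
  · norm_num [h2, show ¬ e < 31 by omega, show ¬ e < 60 by omega, show e < 121 by omega, show e < 152 by omega, show e < 182 by omega, show e < 213 by omega, show e < 244 by omega, show e < 274 by omega, show e < 305 by omega, show e < 335 by omega, show e < 366 by omega]
  push_neg at h2
  by_cases h3 : e < 121
  · norm_num [h3, show ¬ e < 31 by omega, show ¬ e < 60 by omega, show ¬ e < 91 by omega, show e < 152 by omega, show e < 182 by omega, show e < 213 by omega, show e < 244 by omega, show e < 274 by omega, show e < 305 by omega, show e < 335 by omega, show e < 366 by omega]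
  push_neg at h3
  by_cases h4 : e < 152
  · norm_num [h4, show ¬ e < 31 by omega, show ¬ e < 60 by omega, show ¬ e < 91 by omega, show ¬ e < 121 by omega, show e < 182 by omega, show e < 213 by omega, show e < 244 by omega, show e < 274 by omega, show e < 305 by omega, show e < 335 by omega, show e < 366 by omega]
  push_neg at h4
  by_cases h5 : e < 182
  · norm_num [h5, show ¬ e < 31 by omega, show ¬ e < 60 by omega, show ¬ e < 91 by omega, show ¬ e < 121 by omega, show ¬ e < 152 by omega, show e < 213 by omega, show e < 244 by omega, show e < 274 by omega, show e < 305 by omega, show e < 335 by omega, show e < 366 by omega]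
  push_neg at h5
  by_cases h6 : e < 213
  · norm_num [h6, show ¬ e < 31 by omega, show ¬ e < 60 by omega, show ¬ e < 91 by omega, show ¬ e < 121 by omega, show ¬ e < 152 by omega, show ¬ e < 182 by omega, show e < 244 by omega, show e < 274 by omega, show e < 305 by omega, show e < 335 by omega, show e < 366 by omega]
  push_neg at h6
  by_cases h7 : e < 244
  · norm_num [h7, show ¬ e < 31 by omega, show ¬ e < 60 by omega, show ¬ e < 91 by omega, show ¬ e < 121 by omega, show ¬ e < 152 by omega, show ¬ e < 182 by omega, show ¬ e < 213 by omega, show e < 274 by omega, show e < 305 by omega, show e < 335 by omega, show e < 366 by omega]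
  push_neg at h7
  by_cases h8 : e < 274
  · norm_num [h8, show ¬ e < 31 by omega, show ¬ e < 60 by omega, show ¬ e < 91 by omega, show ¬ e < 121 by omega, show ¬ e < 152 by omega, show ¬ e < 182 by omega, show ¬ e < 213 by omega, show ¬ e < 244 by omega, show e < 305 by omega, show e < 335 by omega, show e < 366 by omega]
  push_neg at h8
  by_cases h9 : e < 305
  · norm_num [h9, show ¬ e < 31 by omega, show ¬ e < 60 by omega, show ¬ e < 91 by omega, show ¬ e < 121 by omega, show ¬ e < 152 by omega, show ¬ e < 182 by omega, show ¬ e < 213 by omega, show ¬ e < 244 by omega, show ¬ e < 274 by omega, show e < 335 by omega, show e < 366 by omega]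
  push_neg at h9
  by_cases h10 : e < 335
  · norm_num [h10, show ¬ e < 31 by omega, show ¬ e < 60 by omega, show ¬ e < 91 by omega, show ¬ e < 121 by omega, show ¬ e < 152 by omega, show ¬ e < 182 by omega, show ¬ e < 213 by omega, show ¬ e < 244 by omega, show ¬ e < 274 by omega, show ¬ e < 305 by omega, show e < 366 by omega]
  push_neg at h10
  by_cases h11 : e < 366
  · norm_num [h11, show ¬ e < 31 by omega, show ¬ e < 60 by omega, show ¬ e < 91 by omega, show ¬ e < 121 by omega, show ¬ e < 152 by omega, show ¬ e < 182 by omega, show ¬ e < 213 by omega, show ¬ e < 244 by omega, show ¬ e < 274 by omega, show ¬ e < 305 by omega, show ¬ e < 335 by omega]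
  push_neg at h11
  norm_num [show ¬ e < 31 by omega, show ¬ e < 60 by omega, show ¬ e < 91 by omega, show ¬ e < 121 by omega, show ¬ e < 152 by omega, show ¬ e < 182 by omega, show ¬ e < 213 by omega, show ¬ e < 244 by omega, show ¬ e < 274 by omega, show ¬ e < 305 by omega, show ¬ e < 335 by omega, show ¬ e < 366 by omega]

theorem fmd_eq_reg (e dp mp : Int) :
    (match fmdLoopA e [31, 28, 31, 30, 31, 30, 31, 31, 30, 31, 30, 31] 0 0 with
      | some (m, d) => (d, m) | none => (dp, mp)) =
    (if fmdBsearch e [31, 59, 90, 120, 151, 181, 212, 243, 273, 304, 334, 365] 0 12 = 12 then (dp, mp)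
     else (e - (if fmdBsearch e [31, 59, 90, 120, 151, 181, 212, 243, 273, 304, 334, 365] 0 12 > 0 then ([31, 59, 90, 120, 151, 181, 212, 243, 273, 304, 334, 365] : List Int).getD (fmdBsearch e [31, 59, 90, 120, 151, 181, 212, 243, 273, 304, 334, 365] 0 12 - 1) 0 else 0),
           (fmdBsearch e [31, 59, 90, 120, 151, 181, 212, 243, 273, 304, 334, 365] 0 12 : Int))) := by
  rw [loopA_reg, bs_0_12]
  by_cases h0 : e < 31
  · norm_num [h0, show e < 59 by omega, show e < 90 by omega, show e < 120 by omega, show e < 151 by omega, show e < 181 by omega, show e < 212 by omega, show e < 243 by omega, show e < 273 by omega, show e < 304 by omega, show e < 334 by omega, show e < 365 by omega]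
  push_neg at h0
  by_cases h1 : e < 59
  · norm_num [h1, show ¬ e < 31 by omega, show e < 90 by omega, show e < 120 by omega, show e < 151 by omega, show e < 181 by omega, show e < 212 by omega, show e < 243 by omega, show e < 273 by omega, show e < 304 by omega, show e < 334 by omega, show e < 365 by omega]
  push_neg at h1
  by_cases h2 : e < 90
  · norm_num [h2, show ¬ e < 31 by omega, show ¬ e < 59 by omega, show e < 120 by omega, show e < 151 by omega, show e < 181 by omega, show e < 212 by omega, show e < 243 by omega, show e < 273 by omega, show e < 304 by omega, show e < 334 by omega, show e < 365 by omega]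
  push_neg at h2
  by_cases h3 : e < 120
  · norm_num [h3, show ¬ e < 31 by omega, show ¬ e < 59 by omega, show ¬ e < 90 by omega, show e < 151 by omega, show e < 181 by omega, show e < 212 by omega, show e < 243 by omega, show e < 273 by omega, show e < 304 by omega, show e < 334 by omega, show e < 365 by omega]
  push_neg at h3
  by_cases h4 : e < 151
  · norm_num [h4, show ¬ e < 31 by omega, show ¬ e < 59 by omega, show ¬ e < 90 by omega, show ¬ e < 120 by omega, show e < 181 by omega, show e < 212 by omega, show e < 243 by omega, show e < 273 by omega, show e < 304 by omega, show e < 334 by omega, show e < 365 by omega]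
  push_neg at h4
  by_cases h5 : e < 181
  · norm_num [h5, show ¬ e < 31 by omega, show ¬ e < 59 by omega, show ¬ e < 90 by omega, show ¬ e < 120 by omega, show ¬ e < 151 by omega, show e < 212 by omega, show e < 243 by omega, show e < 273 by omega, show e < 304 by omega, show e < 334 by omega, show e < 365 by omega]
  push_neg at h5
  by_cases h6 : e < 212
  · norm_num [h6, show ¬ e < 31 by omega, show ¬ e < 59 by omega, show ¬ e < 90 by omega, show ¬ e < 120 by omega, show ¬ e < 151 by omega, show ¬ e < 181 by omega, show e < 243 by omega, show e < 273 by omega, show e < 304 by omega, show e < 334 by omega, show e < 365 by omega]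
  push_neg at h6
  by_cases h7 : e < 243
  · norm_num [h7, show ¬ e < 31 by omega, show ¬ e < 59 by omega, show ¬ e < 90 by omega, show ¬ e < 120 by omega, show ¬ e < 151 by omega, show ¬ e < 181 by omega, show ¬ e < 212 by omega, show e < 273 by omega, show e < 304 by omega, show e < 334 by omega, show e < 365 by omega]
  push_neg at h7
  by_cases h8 : e < 273
  · norm_num [h8, show ¬ e < 31 by omega, show ¬ e < 59 by omega, show ¬ e < 90 by omega, show ¬ e < 120 by omega, show ¬ e < 151 by omega, show ¬ e < 181 by omega, show ¬ e < 212 by omega, show ¬ e < 243 by omega, show e < 304 by omega, show e < 334 by omega, show e < 365 by omega]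
  push_neg at h8
  by_cases h9 : e < 304
  · norm_num [h9, show ¬ e < 31 by omega, show ¬ e < 59 by omega, show ¬ e < 90 by omega, show ¬ e < 120 by omega, show ¬ e < 151 by omega, show ¬ e < 181 by omega, show ¬ e < 212 by omega, show ¬ e < 243 by omega, show ¬ e < 273 by omega, show e < 334 by omega, show e < 365 by omega]
  push_neg at h9
  by_cases h10 : e < 334
  · norm_num [h10, show ¬ e < 31 by omega, show ¬ e < 59 by omega, show ¬ e < 90 by omega, show ¬ e < 120 by omega, show ¬ e < 151 by omega, show ¬ e < 181 by omega, show ¬ e < 212 by omega, show ¬ e < 243 by omega, show ¬ e < 273 by omega, show ¬ e < 304 by omega, show e < 365 by omega]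
  push_neg at h10
  by_cases h11 : e < 365
  · norm_num [h11, show ¬ e < 31 by omega, show ¬ e < 59 by omega, show ¬ e < 90 by omega, show ¬ e < 120 by omega, show ¬ e < 151 by omega, show ¬ e < 181 by omega, show ¬ e < 212 by omega, show ¬ e < 243 by omega, show ¬ e < 273 by omega, show ¬ e < 304 by omega, show ¬ e < 334 by omega]
  push_neg at h11
  norm_num [show ¬ e < 31 by omega, show ¬ e < 59 by omega, show ¬ e < 90 by omega, show ¬ e < 120 by omega, show ¬ e < 151 by omega, show ¬ e < 181 by omega, show ¬ e < 212 by omega, show ¬ e < 243 by omega, show ¬ e < 273 by omega, show ¬ e < 304 by omega, show ¬ e < 334 by omega, show ¬ e < 365 by omega]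

theorem match_none_right (dp mp : Int) (r : Option (Int × Int)) :
    (match r, (none : Option (Int × Int)) with
      | some (m, dp), _ => (dp, m)
      | none, some (m, dp) => (dp, m)
      | none, none => (dp, mp)) =
    (match r with | some (m, d) => (d, m) | none => (dp, mp)) := by
  rcases r with _ | ⟨m, d⟩ <;> rfl

theorem match_none_left (dp mp : Int) (r : Option (Int × Int)) :
    (match (none : Option (Int × Int)), r with
      | some (m, dp), _ => (dp, m)
      | none, some (m, dp) => (dp, m)
      | none, none => (dp, mp)) =
    (match r with | some (m, d) => (d, m) | none => (dp, mp)) := by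
  rcases r with _ | ⟨m, d⟩ <;> rfl

-- ===== VERDICT (by name: the statement is the Claim_ definition above) =====
theorem final_months_days_spec : Claim_equal_final_months_days := by
  intro e dp td mp y _
  unfold Spec_final_months_days final_months_days final_months_days_alt
  by_cases h : PySem.Int.mod y 4 = 0
  · simp only [h, if_pos, ne_eq, not_true_eq_false, if_neg, not_false_eq_true]
    rw [match_none_right]
    exact fmd_eq_leap e dp mp
  · simp only [h, if_neg, ne_eq, not_false_eq_true, if_pos]
    rw [match_none_left]
    exact fmd_eq_reg e dp mp
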